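-- pv_equiv track=rewrite | github.com/wongalus7/ojs-login-bruteforce | ojsbrute.py | prioritize_admin_usernames
-- ===== SOURCE A (Python) =====
-- def prioritize_admin_usernames(usernames):
--     admin_keywords = ["admin", "mimin", "atmin", "min", "jurnal", "adminojs", "adminjurnal", "adminjournal", "root", "superuser", "administrator", "ojs", "journal"]
--
--     admin_usernames = []
--     regular_usernames = []
--
--     for username in usernames:
--         has_admin_keyword = any(keyword in username.lower() for keyword in admin_keywords)
--         if has_admin_keyword:
--             admin_usernames.append(username)
--         else:
--             regular_usernames.append(username)
--
--     return admin_usernames + regular_usernames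
-- ===== SOURCE B (Python) =====
-- def prioritize_admin_usernames(usernames):
--     admin_keywords = ["admin", "mimin", "atmin", "min", "jurnal", "adminojs", "adminjurnal", "adminjournal", "root", "superuser", "administrator", "ojs", "journal"]
--
--     def is_admin(username):
--         lowered = username.lower()
--         return any(keyword in lowered for keyword in admin_keywords)
--
--     # stable sort on the boolean key: admin names (key False) first, both
--     # groups keeping their original relative order
--     return sorted(usernames, key=lambda u: not is_admin(u))
-- ===== Notes on version B (the rewrite author's own statement) =====
-- stated objective: idiomatic
-- what changed: Replaced the two-accumulator partition-and-concatenate loop with a single stable sort on the negated has-admin-keyword boolean key, relying on sort stability to keep each group's original order.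
import Mathlib
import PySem

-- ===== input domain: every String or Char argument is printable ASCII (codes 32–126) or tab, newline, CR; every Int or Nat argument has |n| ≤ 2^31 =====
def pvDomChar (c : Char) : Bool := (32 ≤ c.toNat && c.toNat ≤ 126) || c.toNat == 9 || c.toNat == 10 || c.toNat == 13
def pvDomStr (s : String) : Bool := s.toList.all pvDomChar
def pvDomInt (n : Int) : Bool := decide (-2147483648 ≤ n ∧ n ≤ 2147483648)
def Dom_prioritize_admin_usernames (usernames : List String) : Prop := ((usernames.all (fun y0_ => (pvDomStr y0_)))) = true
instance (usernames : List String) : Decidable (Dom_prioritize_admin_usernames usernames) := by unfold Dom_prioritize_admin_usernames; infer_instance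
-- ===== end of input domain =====

-- B replaces the two-accumulator partition-and-concatenate loop with one stable
-- sort on the negated has-admin-keyword boolean key (idiomatic, same result).

-- the module-level keyword list both versions share
def pvAdminKeywords : List String := ["admin", "mimin", "atmin", "min", "jurnal", "adminojs", "adminjurnal", "adminjournal", "root", "superuser", "administrator", "ojs", "journal"]

-- ===== PORT A =====
def prioritize_admin_usernames (usernames : List String) : List String :=
  let acc := usernames.foldl (fun (acc : List String × List String) username =>
    let has_admin_keyword := pvAdminKeywords.any (fun keyword => PySem.Str.isIn keyword (PySem.Str.lower username))
    if has_admin_keyword then (acc.1 ++ [username], acc.2)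
    else (acc.1, acc.2 ++ [username])) ([], [])
  acc.1 ++ acc.2

-- ===== PORT B =====
-- B's helper is_admin(username)
def pvIsAdmin (username : String) : Bool :=
  let lowered := PySem.Str.lower username
  pvAdminKeywords.any (fun keyword => PySem.Str.isIn keyword lowered)

-- sorted(usernames, key=lambda u: not is_admin(u)) — stable sort, False < True
def prioritize_admin_usernames_alt (usernames : List String) : List String :=
  PySem.List.sorted usernames (fun u => !pvIsAdmin u) false

-- ===== PRECONDITION & SPEC =====
def Spec_prioritize_admin_usernames (usernames : List String) (out : List String) : Prop := out = prioritize_admin_usernames_alt usernames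
instance (usernames : List String) (out : List String) : Decidable (Spec_prioritize_admin_usernames usernames out) := by unfold Spec_prioritize_admin_usernames; infer_instance

-- ===== CLAIM (what is proved, stated in full; the proofs are below) =====
def Claim_equal_prioritize_admin_usernames : Prop := ∀ (usernames : List String), Dom_prioritize_admin_usernames usernames → Spec_prioritize_admin_usernames usernames (prioritize_admin_usernames usernames)

-- ===== LEMMAS AND PROOFS =====

-- ===== VERDICT (by name: the statement is the Claim_ definition above) =====
-- B's insertion point for an admin name: after the admin block, before the regular block
theorem pv_insert_admin (x : String) (hx : pvIsAdmin x = true) :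
    ∀ (A B : List String), (∀ a ∈ A, pvIsAdmin a = true) → (∀ b ∈ B, pvIsAdmin b = false) →
    PySem.List.insertBy (fun a b => decide ((!pvIsAdmin a) < (!pvIsAdmin b))) x (A ++ B) = A ++ x :: B := by
  intro A
  induction A with
  | nil =>
    intro B _ hB
    cases B with
    | nil => simp [PySem.List.insertBy]
    | cons b bs =>
      have hb : pvIsAdmin b = false := hB b (by simp)
      simp [PySem.List.insertBy, hx, hb]
  | cons a as ih =>
    intro B hA hB
    have ha : pvIsAdmin a = true := hA a (by simp)
    simpa [PySem.List.insertBy, hx, ha] using ih B (fun y hy => hA y (by simp [hy])) hB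

-- B's insertion point for a regular name: at the very end
theorem pv_insert_regular (x : String) (hx : pvIsAdmin x = false) (ys : List String) :
    PySem.List.insertBy (fun a b => decide ((!pvIsAdmin a) < (!pvIsAdmin b))) x ys = ys ++ [x] := by
  apply PySem.List.insertBy_of_forall_not_before
  intro y _
  simp [hx, Bool.lt_iff]

-- B's stable insertion sort on the boolean key IS the partition
theorem pv_sorted_eq_partition (xs : List String) :
    ∀ (A B : List String), (∀ a ∈ A, pvIsAdmin a = true) → (∀ b ∈ B, pvIsAdmin b = false) →
    xs.foldl (fun acc x => PySem.List.insertBy (fun a b => decide ((!pvIsAdmin a) < (!pvIsAdmin b))) x acc) (A ++ B)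
      = (A ++ xs.filter pvIsAdmin) ++ (B ++ xs.filter (fun u => !pvIsAdmin u)) := by
  induction xs with
  | nil => intro A B _ _; simp
  | cons x xs ih =>
    intro A B hA hB
    by_cases hx : pvIsAdmin x = true
    · rw [List.foldl_cons, pv_insert_admin x hx A B hA hB]
      have : A ++ x :: B = (A ++ [x]) ++ B := by simp
      rw [this, ih (A ++ [x]) B (by intro y hy; rcases List.mem_append.mp hy with h | h
                                    · exact hA y h
                                    · simp at h; subst h; exact hx) hB]
      simp [List.filter_cons, hx]
    · have hx' : pvIsAdmin x = false := by simpa using hx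
      rw [List.foldl_cons, pv_insert_regular x hx', List.append_assoc,
        ih A (B ++ [x]) hA (by intro y hy; rcases List.mem_append.mp hy with h | h
                               · exact hB y h
                               · simp at h; subst h; exact hx')]
      simp [List.filter_cons, hx']

-- A's two accumulators are the two filters
theorem pv_partition_loop (xs : List String) :
    ∀ (A B : List String),
    xs.foldl (fun (acc : List String × List String) username =>
      let has_admin_keyword := pvAdminKeywords.any (fun keyword => PySem.Str.isIn keyword (PySem.Str.lower username))
      if has_admin_keyword then (acc.1 ++ [username], acc.2)
      else (acc.1, acc.2 ++ [username])) (A, B)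
      = (A ++ xs.filter pvIsAdmin, B ++ xs.filter (fun u => !pvIsAdmin u)) := by
  induction xs with
  | nil => intro A B; simp
  | cons x xs ih =>
    intro A B
    have hkey : (pvAdminKeywords.any (fun keyword => PySem.Str.isIn keyword (PySem.Str.lower x))) = pvIsAdmin x := rfl
    by_cases hx : pvIsAdmin x = true
    · simp only [List.foldl_cons, hkey, hx, if_true, ih, List.filter_cons]
      simp
    · have hx' : pvIsAdmin x = false := by simpa using hx
      simp only [List.foldl_cons, hkey, hx', Bool.false_eq_true, if_false, ih, List.filter_cons]
      simp

-- ===== VERDICT (by name: the statement is the Claim_ definition above) =====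
theorem prioritize_admin_usernames_spec : Claim_equal_prioritize_admin_usernames := by
  intro usernames _
  unfold Spec_prioritize_admin_usernames prioritize_admin_usernames prioritize_admin_usernames_alt
  rw [PySem.List.sorted_eq_foldl_insertBy]
  have hB := pv_sorted_eq_partition usernames [] [] (by simp) (by simp)
  simp only [List.nil_append] at hB
  rw [hB, pv_partition_loop]
  simp
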